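-- pv_equiv track=rewrite | github.com/JonasTB/Grafos_eulerianos | main.py | checkGraphSemiEulerian
-- ===== SOURCE A (Python) =====
-- from typing import List, Union
--
-- def connections(graph) -> dict:
--     connections = {}
--     for i in graph:
--         for j in i:
--             if j not in connections:
--                 connections[j] = 0;
--             connections[j] += 1;
--
--     return connections
--
-- def checkGraphSemiEulerian(graph: List[List[int]]) -> bool:
--     connect = connections(graph)
--     count = 0
--
--     for i in connect:
--         degress = connect[i] % 2
--         if (degress != 0):
--             count += 1
--
--         if (count > 3):
--             return False
--
--     return count == 2
-- ===== SOURCE B (Python) =====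
-- def checkGraphSemiEulerian(graph):
--     # single pass: maintain the set of vertices seen an odd number of times
--     odd = set()
--     for row in graph:
--         for j in row:
--             if j in odd:
--                 odd.remove(j)
--             else:
--                 odd.add(j)
--     return len(odd) == 2
-- ===== Notes on version B (the rewrite author's own statement) =====
-- stated objective: simpler
-- what changed: Replaces the count-dict build plus a second odd-degree counting loop (with a count>3 short-circuit) by one fused pass that toggles each vertex in a parity set and compares the set's size to 2.
import Mathlib
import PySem

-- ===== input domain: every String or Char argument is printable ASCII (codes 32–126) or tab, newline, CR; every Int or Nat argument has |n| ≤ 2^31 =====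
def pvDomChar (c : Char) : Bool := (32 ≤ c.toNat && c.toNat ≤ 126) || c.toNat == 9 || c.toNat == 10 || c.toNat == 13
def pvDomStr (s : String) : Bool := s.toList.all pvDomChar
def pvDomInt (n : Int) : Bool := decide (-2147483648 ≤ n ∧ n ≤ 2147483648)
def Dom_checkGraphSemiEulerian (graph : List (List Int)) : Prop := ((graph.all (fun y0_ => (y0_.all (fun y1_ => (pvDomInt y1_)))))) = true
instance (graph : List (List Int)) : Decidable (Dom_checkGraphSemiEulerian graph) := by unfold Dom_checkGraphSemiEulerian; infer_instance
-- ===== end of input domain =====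

-- B replaces A's count-dict build plus second odd-counting loop (with its count>3
-- short-circuit) by one fused pass toggling each vertex in a parity set; objective: simpler.

-- ===== PORT A =====
-- helper connections(graph): build the degree dict
def pvConnStep (d : PySem.Dict Int Int) (j : Int) : PySem.Dict Int Int :=
  let d := if d.contains j then d else d.insert j 0   -- if j not in connections: connections[j] = 0
  d.insert j (d.getD j 0 + 1)                         -- connections[j] += 1

def pvConnections (graph : List (List Int)) : PySem.Dict Int Int :=
  graph.foldl (fun d i => i.foldl pvConnStep d) PySem.Dict.empty

-- the 'for i in connect' loop with its early 'return False'
def pvSemiLoop (connect : PySem.Dict Int Int) : List Int → Int → Bool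
  | [], count => decide (count = 2)
  | i :: rest, count =>
    let degress := PySem.Int.mod (connect.getD i 0) 2
    let count := if degress ≠ 0 then count + 1 else count
    if count > 3 then false else pvSemiLoop connect rest count

def checkGraphSemiEulerian (graph : List (List Int)) : Bool :=
  let connect := pvConnections graph
  pvSemiLoop connect connect.keys 0

-- ===== PORT B =====
-- toggle j in the parity set (Python: remove if present — the guard holds, so discard is exact — else add)
def pvToggle (s : PySem.Set Int) (j : Int) : PySem.Set Int :=
  if PySem.Set.contains s j then PySem.Set.discard s j else PySem.Set.add s j

def checkGraphSemiEulerian_alt (graph : List (List Int)) : Bool :=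
  let odd := graph.foldl (fun s row => row.foldl pvToggle s) PySem.Set.empty
  decide (PySem.Set.len odd = 2)

-- ===== PRECONDITION & SPEC =====
def Spec_checkGraphSemiEulerian (graph : List (List Int)) (out : Bool) : Prop := out = checkGraphSemiEulerian_alt graph
instance (graph : List (List Int)) (out : Bool) : Decidable (Spec_checkGraphSemiEulerian graph out) := by unfold Spec_checkGraphSemiEulerian; infer_instance

-- ===== CLAIM (what is proved, stated in full; the proofs are below) =====
def Claim_equal_checkGraphSemiEulerian : Prop := ∀ (graph : List (List Int)), Dom_checkGraphSemiEulerian graph → Spec_checkGraphSemiEulerian graph (checkGraphSemiEulerian graph)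

-- ===== LEMMAS AND PROOFS =====

-- both nested loops are a single fold over the flattened vertex-occurrence list
theorem pv_foldl_foldl_flat {α β : Type} (f : β → α → β) (g : List (List α)) (init : β) :
    g.foldl (fun a row => row.foldl f a) init = (g.flatMap id).foldl f init := by
  induction g generalizing init with
  | nil => rfl
  | cons r rest ih => simp [List.flatMap_cons, List.foldl_append, ih]

-- A's dict-building step is the standard counting insert
theorem pvConnStep_eq : pvConnStep = fun (d : PySem.Dict Int Int) j => d.insert j (d.getD j 0 + 1) := by
  funext d j
  unfold pvConnStep
  by_cases h : d.contains j = true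
  · simp [h]
  · have hco : d.contains j = false := by simpa using h
    simp only [h, Bool.false_eq_true, if_false]
    rw [PySem.Dict.getD_insert_self, PySem.Dict.getD_of_not_contains d 0 hco]
    apply PySem.Dict.ext
    rw [PySem.Dict.items_insert_of_contains _ _ (PySem.Dict.contains_insert_self _ _ _),
        PySem.Dict.items_insert_of_not_contains _ _ hco,
        PySem.Dict.items_insert_of_not_contains _ _ hco]
    rw [List.map_append]
    congr 1
    · conv_rhs => rw [← List.map_id d.items]
      apply List.map_congr_left
      intro p hp
      have hk : p.1 ∈ d.keys := PySem.Dict.mem_keys_of_mem_items d hp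
      have hne : p.1 ≠ j := by
        intro he
        have hcj : d.contains j = true := (PySem.Dict.contains_iff_mem_keys d j).mpr (he ▸ hk)
        rw [hcj] at hco
        simp at hco
      simp [hne]
    · simp

theorem pvConn_getD (g : List (List Int)) (x : Int) :
    (pvConnections g).getD x 0 = ((g.flatMap id).count x : Int) := by
  unfold pvConnections
  rw [pvConnStep_eq, pv_foldl_foldl_flat, PySem.Dict.getD_foldl_insert_add_one]
  simp [PySem.Dict.getD_empty]

theorem pvConn_keys (g : List (List Int)) :
    (pvConnections g).keys = PySem.Set.ofList (g.flatMap id) := by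
  unfold pvConnections
  rw [pvConnStep_eq, pv_foldl_foldl_flat,
      PySem.Dict.keys_foldl_insert (g.flatMap id) (fun d x => d.getD x 0 + 1) PySem.Dict.empty]
  rfl

-- A's counting loop with its early exit is just: total odd count = 2
theorem pvSemiLoop_eq (connect : PySem.Dict Int Int) (keys : List Int) :
    ∀ c : Int, 0 ≤ c →
      pvSemiLoop connect keys c =
        decide (c + (keys.countP (fun k => decide (PySem.Int.mod (connect.getD k 0) 2 ≠ 0)) : Int) = 2) := by
  induction keys with
  | nil => intro c _; simp [pvSemiLoop]
  | cons k rest ih =>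
    intro c hc
    have hcnt : (0 : Int) ≤ (rest.countP (fun k => decide (PySem.Int.mod (connect.getD k 0) 2 ≠ 0)) : Int) := by positivity
    by_cases hp : PySem.Int.mod (connect.getD k 0) 2 ≠ 0
    · have hpk : decide (PySem.Int.mod (connect.getD k 0) 2 ≠ 0) = true := decide_eq_true hp
      simp only [pvSemiLoop, if_pos hp, List.countP_cons, hpk, if_true]
      by_cases hgt : c + 1 > 3
      · rw [if_pos hgt]
        have hne : ¬ (c + ((rest.countP (fun k => decide (PySem.Int.mod (connect.getD k 0) 2 ≠ 0)) + 1 : Nat) : Int) = 2) := by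
          push_cast at hcnt ⊢; omega
        exact (decide_eq_false hne).symm
      · rw [if_neg hgt, ih (c + 1) (by omega), decide_eq_decide]
        push_cast
        omega
    · have hpk : decide (PySem.Int.mod (connect.getD k 0) 2 ≠ 0) = false := decide_eq_false hp
      simp only [pvSemiLoop, if_neg hp, List.countP_cons, hpk, Bool.false_eq_true, if_false, Nat.add_zero]
      by_cases hgt : c > 3
      · rw [if_pos hgt]
        have hne : ¬ (c + ((rest.countP (fun k => decide (PySem.Int.mod (connect.getD k 0) 2 ≠ 0)) : Nat) : Int) = 2) := by
          push_cast at hcnt ⊢; omega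
        exact (decide_eq_false hne).symm
      · rw [if_neg hgt, ih c hc]

-- B's toggle: membership and nodup of one step
theorem pvToggle_mem (s : List Int) (j x : Int) :
    x ∈ pvToggle s j ↔ ((x ∈ s ∧ x ≠ j) ∨ (x ∉ s ∧ x = j)) := by
  by_cases hj : j ∈ s
  · simp only [pvToggle, PySem.Set.contains, PySem.Set.discard, List.contains_eq_mem, hj,
      decide_true, if_true, List.mem_filter, Bool.not_eq_eq_eq_not, Bool.not_true,
      beq_eq_false_iff_ne, ne_eq]
    constructor
    · rintro ⟨a, b⟩; exact Or.inl ⟨a, b⟩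
    · rintro (⟨a, b⟩ | ⟨a, rfl⟩)
      · exact ⟨a, b⟩
      · exact absurd hj a
  · simp only [pvToggle, PySem.Set.contains, PySem.Set.add, List.contains_eq_mem, hj,
      decide_false, Bool.false_eq_true, if_false, List.mem_append, List.mem_singleton]
    constructor
    · rintro (a | rfl)
      · exact Or.inl ⟨a, fun he => hj (he ▸ a)⟩
      · exact Or.inr ⟨hj, rfl⟩
    · rintro (⟨a, _⟩ | ⟨_, rfl⟩)
      · exact Or.inl a
      · exact Or.inr rfl

theorem pvToggle_nodup (s : List Int) (hs : s.Nodup) (j : Int) : (pvToggle s j).Nodup := by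
  by_cases hj : j ∈ s
  · simp only [pvToggle, PySem.Set.contains, PySem.Set.discard, List.contains_eq_mem, hj,
      decide_true, if_true]
    exact hs.filter _
  · simp only [pvToggle, PySem.Set.contains, PySem.Set.add, List.contains_eq_mem, hj,
      decide_false, Bool.false_eq_true, if_false, List.nodup_append]
    refine ⟨hs, List.nodup_singleton j, ?_⟩
    intro x hx y hy
    rw [List.mem_singleton] at hy
    subst hy
    exact fun he => hj (he ▸ hx)

-- B's toggle fold: result is nodup and holds exactly the odd-parity vertices
theorem pvToggle_fold (l : List Int) :
    ∀ s : List Int, s.Nodup →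
      (l.foldl pvToggle s).Nodup ∧
      ∀ x : Int, x ∈ l.foldl pvToggle s ↔
        ((x ∈ s ∧ l.count x % 2 = 0) ∨ (x ∉ s ∧ l.count x % 2 = 1)) := by
  induction l with
  | nil =>
    intro s hs
    refine ⟨hs, fun x => ?_⟩
    simp
  | cons j rest ih =>
    intro s hs
    obtain ⟨hn, hm⟩ := ih (pvToggle s j) (pvToggle_nodup s hs j)
    refine ⟨by simpa using hn, fun x => ?_⟩
    rw [List.foldl_cons, hm x, pvToggle_mem s j x, List.count_cons]
    by_cases hx : x = j
    · subst hx
      by_cases hsx : x ∈ s <;> simp [hsx] <;> omega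
    · by_cases hsx : x ∈ s <;> simp [hsx, hx, Ne.symm hx]

-- ===== VERDICT (by name: the statement is the Claim_ definition above) =====
theorem checkGraphSemiEulerian_spec : Claim_equal_checkGraphSemiEulerian := by
  unfold Claim_equal_checkGraphSemiEulerian
  intro graph _
  unfold Spec_checkGraphSemiEulerian
  simp only [checkGraphSemiEulerian, checkGraphSemiEulerian_alt]
  -- A side
  rw [pvSemiLoop_eq (pvConnections graph) (pvConnections graph).keys 0 le_rfl, pvConn_keys]
  have hA : ∀ k : Int, (decide (PySem.Int.mod ((pvConnections graph).getD k 0) 2 ≠ 0)) =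
      decide ((graph.flatMap id).count k % 2 = 1) := by
    intro k
    rw [pvConn_getD, PySem.Int.mod_eq_emod_of_pos (by norm_num), decide_eq_decide]
    omega
  rw [List.countP_congr (fun k _ => by rw [hA k])]
  -- B side
  rw [pv_foldl_foldl_flat]
  have hempty : (PySem.Set.empty : PySem.Set Int) = ([] : List Int) := rfl
  rw [hempty]
  have hodd_nodup : ((graph.flatMap id).foldl pvToggle ([] : List Int)).Nodup :=
    (pvToggle_fold (graph.flatMap id) [] List.nodup_nil).1
  have hodd_mem : ∀ x : Int, x ∈ (graph.flatMap id).foldl pvToggle ([] : List Int) ↔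
      (graph.flatMap id).count x % 2 = 1 := by
    intro x
    have := (pvToggle_fold (graph.flatMap id) [] List.nodup_nil).2 x
    simpa using this
  have hfil_nodup : ((PySem.Set.ofList (graph.flatMap id)).filter
      (fun k => decide ((graph.flatMap id).count k % 2 = 1))).Nodup :=
    (PySem.Set.nodup_ofList (graph.flatMap id)).filter _
  have hperm : ((PySem.Set.ofList (graph.flatMap id)).filter
      (fun k => decide ((graph.flatMap id).count k % 2 = 1))).Perm
      ((graph.flatMap id).foldl pvToggle ([] : List Int)) := by
    rw [List.perm_ext_iff_of_nodup hfil_nodup hodd_nodup]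
    intro a
    rw [List.mem_filter, PySem.Set.mem_ofList, hodd_mem a, decide_eq_true_eq]
    constructor
    · rintro ⟨_, h⟩; exact h
    · intro h
      refine ⟨List.count_pos_iff.mp (by omega), h⟩
  rw [List.countP_eq_length_filter, hperm.length_eq, decide_eq_decide]
  simp only [PySem.Set.len]
  omega
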